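-- pv_equiv track=rewrite | github.com/Xenokrat/algo_ex_28 | transform_transform.py | transform
-- ===== SOURCE A (Python) =====
-- def transform(a: list[int], n: int) -> list[int]:
--     b = []
--     for i in range(n):
--         for j in range(n - i):
--             k = i + j
--             subarray = a[j:k + 1]
--             b.append(max(subarray))
--
--     return b
-- ===== SOURCE B (Python) =====
-- def transform(a: list[int], n: int) -> list[int]:
--     # DP over window length: the max of a window of length i+1 is the max of
--     # the length-i window at the same start and the new element entering on the right.
--     row = [a[j] for j in range(n)]
--     b = list(row)
--     for i in range(1, n):
--         row = [max(row[j], a[j + i]) for j in range(n - i)]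
--         b.extend(row)
--     return b
-- ===== Notes on version B (the rewrite author's own statement) =====
-- stated objective: faster
-- what changed: Replaces the per-window slice+max (O(n^3)) by a dynamic program that derives each length-(i+1) window maximum from the length-i row in O(1); intended as asymptotically faster, measured 23.6x at n=4096 (the largest size where A still finished).
import Mathlib
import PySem

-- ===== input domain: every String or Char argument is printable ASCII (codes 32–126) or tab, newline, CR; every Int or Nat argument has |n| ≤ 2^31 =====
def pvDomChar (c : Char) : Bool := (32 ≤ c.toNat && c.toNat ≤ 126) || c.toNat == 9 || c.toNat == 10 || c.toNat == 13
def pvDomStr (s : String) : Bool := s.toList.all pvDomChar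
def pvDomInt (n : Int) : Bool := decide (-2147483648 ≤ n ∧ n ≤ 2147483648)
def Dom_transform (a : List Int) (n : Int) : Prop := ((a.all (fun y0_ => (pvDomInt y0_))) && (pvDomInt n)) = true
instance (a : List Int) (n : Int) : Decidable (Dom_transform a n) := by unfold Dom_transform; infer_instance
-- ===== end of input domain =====

-- B replaces A's per-window slice+max with a dynamic program that extends the previous
-- length's row of window maxima by one element each; intended as faster (measured 23.6x at n=4096).

-- ===== PORT A =====
def transform (a : List Int) (n : Int) : List Int :=
  (PySem.List.pyRange 0 n 1).foldl (fun b i =>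
    (PySem.List.pyRange 0 (n - i) 1).foldl (fun b j =>
      let k := i + j
      let subarray := PySem.List.slice a (some j) (some (k + 1))
      b ++ [(PySem.List.max? subarray (fun y => y)).getD 0]) b) []

-- ===== PORT B =====
def transform_alt (a : List Int) (n : Int) : List Int :=
  let row0 := (PySem.List.pyRange 0 n 1).map (fun j => PySem.List.pyGetD a j 0)
  let res := (PySem.List.pyRange 1 n 1).foldl
    (fun (st : List Int × List Int) i =>
      let row := (PySem.List.pyRange 0 (n - i) 1).map
        (fun j => max (PySem.List.pyGetD st.2 j 0) (PySem.List.pyGetD a (j + i) 0))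
      (st.1 ++ row, row)) (row0, row0)
  res.1

-- ===== PRECONDITION & SPEC =====
-- Pre_ excludes exactly the inputs where A raises: when n > len(a) some window slice is
-- empty and Python's max([]) raises ValueError (B raises IndexError there too).
def Pre_transform (a : List Int) (n : Int) : Prop := n ≤ (a.length : Int)
instance (a : List Int) (n : Int) : Decidable (Pre_transform a n) := by unfold Pre_transform; infer_instance
def pvWitness_transform : List Int × Int := ([3, -1, 4, 1, 5], 5)

def Spec_transform (a : List Int) (n : Int) (out : List Int) : Prop := out = transform_alt a n
instance (a : List Int) (n : Int) (out : List Int) : Decidable (Spec_transform a n out) := by unfold Spec_transform; infer_instance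

-- ===== CLAIM (what is proved, stated in full; the proofs are below) =====
def Claim_equal_transform : Prop := ∀ (a : List Int) (n : Int), Dom_transform a n → Pre_transform a n → Spec_transform a n (transform a n)

-- ===== LEMMAS AND PROOFS =====

-- Mx a j i = max of the window of a starting at j, of length i+1
def Mx (a : List Int) (j i : Nat) : Int := ((a.drop (j+1)).take i).foldl max (a.getD j 0)
-- all window maxima for windows of length i+1
def RowsF (a : List Int) (N i : Nat) : List Int := (List.range (N - i)).map (fun j => Mx a j i)
-- the common value of both programs
def OutF (a : List Int) (N : Nat) : List Int := (List.range N).foldl (fun b i => b ++ RowsF a N i) []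
-- the loop body of transform_alt's fold
def Bstep (a : List Int) (n : Int) (st : List Int × List Int) (i : Int) : List Int × List Int :=
  let row := (PySem.List.pyRange 0 (n - i) 1).map
    (fun j => max (PySem.List.pyGetD st.2 j 0) (PySem.List.pyGetD a (j + i) 0))
  (st.1 ++ row, row)

lemma Mx_succ (a : List Int) (j i : Nat) (h : j + i + 1 < a.length) :
    Mx a j (i+1) = max (Mx a j i) (a.getD (j+i+1) 0) := by
  unfold Mx
  have hlen : i < (List.drop (j+1) a).length := by simp; omega
  rw [List.take_add_one, List.getElem?_eq_getElem hlen]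
  have hg : (List.drop (j+1) a)[i] = a[j+i+1]'h := by
    rw [List.getElem_drop]; congr 1; omega
  simp [List.foldl_append, hg, List.getElem?_eq_getElem h]

lemma max_slice (a : List Int) (j i : Nat) (h : j + i < a.length) :
    (PySem.List.max? ((a.drop j).take (i+1)) (fun y => y)).getD 0 = Mx a j i := by
  have hj : j < a.length := by omega
  rw [List.drop_eq_getElem_cons hj, List.take_succ_cons, PySem.List.max?_id_cons]
  unfold Mx
  rw [List.getD_eq_getElem a 0 hj]
  rfl

lemma A_eq (a : List Int) (N : Nat) (h : N ≤ a.length) :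
    transform a (N : Int) = OutF a N := by
  unfold transform OutF
  rw [PySem.List.pyRange_one, List.foldl_map]
  simp only [Int.sub_zero, Int.toNat_natCast, zero_add]
  apply PySem.List.foldl_congr_mem
  intro b i hi
  have hiN : i < N := List.mem_range.mp hi
  have hcast : (N : Int) - (i : Int) = ((N - i : Nat) : Int) := by omega
  rw [hcast, PySem.List.pyRange_one, List.foldl_map]
  simp only [Int.sub_zero, Int.toNat_natCast, zero_add]
  rw [PySem.List.foldl_append_singleton_eq_map]
  congr 1
  apply List.map_congr_left
  intro j hj
  have hjN : j < N - i := List.mem_range.mp hj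
  have hc2 : ((i:Int) + (j:Int) + 1) = (j:Int) + ((i+1 : Nat) : Int) := by push_cast; ring
  show (PySem.List.max? (PySem.List.slice a (some (j:Int)) (some ((i:Int)+(j:Int)+1))) (fun y => y)).getD 0 = _
  rw [hc2, PySem.List.slice_natCast_add, max_slice a j i (by omega)]

lemma rows_getD (a : List Int) (N k j : Nat) (hj : j < N - k) :
    (RowsF a N k).getD j 0 = Mx a j k := by
  unfold RowsF
  rw [List.getD_eq_getElem _ 0 (by simpa using hj)]
  simp

lemma Bstep_row (a : List Int) (N k : Nat) (h : N ≤ a.length) (hk : k + 1 < N)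
    (p : List Int) :
    Bstep a (N : Int) (p, RowsF a N k) (1 + (k : Nat)) =
      (p ++ RowsF a N (k+1), RowsF a N (k+1)) := by
  unfold Bstep
  have hrow : (PySem.List.pyRange 0 ((N:Int) - (1 + (k:Nat))) 1).map
      (fun j => max (PySem.List.pyGetD (RowsF a N k) j 0) (PySem.List.pyGetD a (j + (1 + (k:Nat))) 0))
      = RowsF a N (k+1) := by
    have hcast : (N : Int) - (1 + (k:Nat)) = ((N - (k + 1) : Nat) : Int) := by omega
    rw [hcast, PySem.List.pyRange_one]
    simp only [Int.sub_zero, Int.toNat_natCast, zero_add, List.map_map]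
    unfold RowsF
    apply List.map_congr_left
    intro j hj
    have hjN : j < N - (k+1) := List.mem_range.mp hj
    have hc1 : ((j:Nat) : Int) + (1 + (k:Nat)) = ((j + (k+1) : Nat) : Int) := by push_cast; ring
    show max (PySem.List.pyGetD (RowsF a N k) (j:Int) 0) (PySem.List.pyGetD a ((j:Int) + (1 + (k:Nat))) 0) = Mx a j (k+1)
    rw [hc1, PySem.List.pyGetD_natCast, PySem.List.pyGetD_natCast,
      rows_getD a N k j (by omega)]
    have hidx : j + (k + 1) = j + k + 1 := by omega
    rw [hidx, ← Mx_succ a j k (by omega)]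
  simp only [hrow]

lemma B_inv (a : List Int) (N : Nat) (h : N ≤ a.length) (c : Nat) (hc : c < N) :
    ((List.range c).map (fun k => (1:Int) + (k:Nat))).foldl (Bstep a (N:Int))
        (RowsF a N 0, RowsF a N 0)
      = ((List.range (c+1)).foldl (fun b i => b ++ RowsF a N i) [], RowsF a N c) := by
  induction c with
  | zero => simp
  | succ c ih =>
    rw [List.range_succ, List.map_append, List.foldl_append, ih (by omega)]
    simp only [List.map_cons, List.map_nil, List.foldl_cons, List.foldl_nil]
    rw [Bstep_row a N c h (by omega)]
    rw [show List.range (c+1+1) = List.range (c+1) ++ [c+1] from List.range_succ]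
    simp [List.foldl_append]

lemma B_eq (a : List Int) (N : Nat) (h : N ≤ a.length) :
    transform_alt a (N : Int) = OutF a N := by
  have hrow0 : (PySem.List.pyRange 0 (N:Int) 1).map (fun j => PySem.List.pyGetD a j 0)
      = RowsF a N 0 := by
    rw [PySem.List.pyRange_one]
    simp only [Int.sub_zero, Int.toNat_natCast, zero_add, List.map_map]
    unfold RowsF
    simp [Mx]
  show ((PySem.List.pyRange 1 (N:Int) 1).foldl (Bstep a (N:Int)) (_, _)).1 = _
  rw [hrow0]
  rcases Nat.eq_zero_or_pos N with h0 | h0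
  · subst h0
    have hnil : PySem.List.pyRange 1 (((0:Nat)):Int) 1 = [] :=
      PySem.List.pyRange_one_eq_nil (by norm_num)
    rw [hnil]
    simp [RowsF, OutF]
  · have hr : PySem.List.pyRange 1 (N:Int) 1
        = (List.range (N-1)).map (fun k => (1:Int) + (k:Nat)) := by
      rw [PySem.List.pyRange_one]
      have ht : ((N:Int) - 1).toNat = N - 1 := by omega
      rw [ht]
    rw [hr, B_inv a N h (N-1) (by omega)]
    have : N - 1 + 1 = N := by omega
    rw [this]
    rfl

-- ===== VERDICT (by name: the statement is the Claim_ definition above) =====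
theorem transform_spec : Claim_equal_transform := by
  intro a n _ hpre
  unfold Spec_transform
  by_cases hn : n ≤ 0
  · have hA : transform a n = [] := by
      simp [transform, PySem.List.pyRange_one_eq_nil hn]
    have hB : transform_alt a n = [] := by
      simp [transform_alt, PySem.List.pyRange_one_eq_nil hn,
        PySem.List.pyRange_one_eq_nil (by omega : n ≤ 1)]
    rw [hA, hB]
  · have hN : n = ((n.toNat : Nat) : Int) := by omega
    have hlen : n.toNat ≤ a.length := by
      unfold Pre_transform at hpre; omega
    rw [hN, A_eq a n.toNat hlen, B_eq a n.toNat hlen]
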